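-- pv_equiv track=rewrite | github.com/billy614oh/CSE4256 | main.py | anti_diag
-- ===== SOURCE A (Python) =====
-- def anti_diag(n):
--   m = n;
--   l = []
--   for x in range(m):
--     li2 = []
--     for y in range(n):
--       if y + x == m - 1:
--         li2.append(1)
--       else:
--         li2.append(0)
--     l.append(li2)
--   return l
-- ===== SOURCE B (Python) =====
-- def anti_diag(n):
--   if n <= 0:
--     return []
--   row = [0] * (n - 1) + [1]
--   l = []
--   for _ in range(n):
--     l.append(row)
--     row = row[1:] + row[:1]
--   return l
-- ===== Notes on version B (the rewrite author's own statement) =====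
-- stated objective: alternative
-- what changed: B maintains a single running row, starting from [0]*(n-1)+[1] and deriving each next row by rotating the previous one left (row[1:]+row[:1]), instead of A's nested loops that test y+x==m-1 for every cell.
import Mathlib
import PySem

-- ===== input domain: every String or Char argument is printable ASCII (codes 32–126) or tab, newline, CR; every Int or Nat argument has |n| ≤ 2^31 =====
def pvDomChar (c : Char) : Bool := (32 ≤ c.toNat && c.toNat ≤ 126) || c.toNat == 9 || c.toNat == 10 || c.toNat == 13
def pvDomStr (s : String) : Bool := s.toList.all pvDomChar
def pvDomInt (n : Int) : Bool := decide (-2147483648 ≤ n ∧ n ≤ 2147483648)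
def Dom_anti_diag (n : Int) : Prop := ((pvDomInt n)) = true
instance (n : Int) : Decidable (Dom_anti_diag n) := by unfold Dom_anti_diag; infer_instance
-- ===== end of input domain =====

-- B keeps one running row and derives each next row by rotating it left (row[1:] + row[:1]),
-- instead of A's nested loops testing y+x==m-1 for every cell (objective: alternative).

-- ===== PORT A =====
def anti_diag (n : Int) : List (List Int) :=
  let m := n
  (PySem.List.pyRange 0 m 1).foldl (fun l x =>
    l ++ [(PySem.List.pyRange 0 n 1).foldl (fun li2 y =>
      if y + x = m - 1 then li2 ++ [1] else li2 ++ [0]) []]) []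

-- ===== PORT B =====
def anti_diag_alt (n : Int) : List (List Int) :=
  if n ≤ 0 then []
  else
    ((PySem.List.pyRange 0 n 1).foldl (fun st _ =>
        (st.1 ++ [st.2],
         PySem.List.slice st.2 (some 1) none ++ PySem.List.slice st.2 none (some 1)))
      (([] : List (List Int)), List.replicate (n - 1).toNat 0 ++ [1])).1

-- ===== PRECONDITION & SPEC =====
def Spec_anti_diag (n : Int) (out : List (List Int)) : Prop := out = anti_diag_alt n
instance (n : Int) (out : List (List Int)) : Decidable (Spec_anti_diag n out) := by unfold Spec_anti_diag; infer_instance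

-- ===== CLAIM (what is proved, stated in full; the proofs are below) =====
def Claim_equal_anti_diag : Prop := ∀ (n : Int), Dom_anti_diag n → Spec_anti_diag n (anti_diag n)

-- ===== LEMMAS AND PROOFS =====

-- row k of the anti-diagonal matrix of size m (1 at position m-1-k)
def pvRow (m k : Nat) : List Int := List.replicate (m - 1 - k) 0 ++ 1 :: List.replicate k 0

theorem pvRow_length (m k : Nat) (hk : k < m) : (pvRow m k).length = m := by
  simp [pvRow]; omega

-- one left rotation of a row
def pvRot (r : List Int) : List Int := r.tail ++ r.take 1

theorem pvRep_append_zero (k : Nat) :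
    List.replicate k (0 : Int) ++ [0] = 0 :: List.replicate k 0 := by
  induction k with
  | zero => rfl
  | succ k ih => simp [List.replicate_succ, ih]

theorem pvRot_row (m k : Nat) (hk : k < m) : pvRot (pvRow m k) = pvRow m ((k + 1) % m) := by
  unfold pvRot pvRow
  rcases Nat.lt_or_ge k (m - 1) with h | h
  · -- 1 is not at the front: rotation moves it one step left
    have h1 : m - 1 - k = (m - 1 - k - 1) + 1 := by omega
    have h2 : (k + 1) % m = k + 1 := Nat.mod_eq_of_lt (by omega)
    rw [h1, h2]
    have h3 : m - 1 - (k + 1) = m - 1 - k - 1 := by omega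
    simp only [List.replicate_succ, h3, List.cons_append, List.tail_cons,
      List.take_succ_cons, List.take_zero]
    simp [pvRep_append_zero]
  · -- k = m - 1: the 1 is at the front and wraps around
    have hk1 : k = m - 1 := by omega
    have h2 : (k + 1) % m = 0 := by
      have : k + 1 = m := by omega
      simp [this]
    subst hk1
    simp [h2]

theorem foldl_append_singleton {α β : Type} (f : α → β) (xs : List α) (init : List β) :
    xs.foldl (fun acc y => acc ++ [f y]) init = init ++ xs.map f := by
  induction xs generalizing init with
  | nil => simp
  | cons a t ih => simp [List.foldl, ih]

theorem foldl_append_ite {α : Type} (p : α → Prop) [DecidablePred p] (xs : List α)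
    (init : List Int) :
    xs.foldl (fun acc y => if p y then acc ++ [1] else acc ++ [0]) init
      = init ++ xs.map (fun y => if p y then (1 : Int) else 0) := by
  induction xs generalizing init with
  | nil => simp
  | cons a t ih =>
    simp only [List.foldl, List.map]
    by_cases h : p a <;> simp [h, ih]

-- A's inner loop produces exactly pvRow
theorem a_row_eq (m i : Nat) (hi : i < m) :
    (List.range m).map (fun (y : Nat) => if (y : Int) + (i : Int) = (m : Int) - 1 then (1 : Int) else 0)
      = pvRow m i := by
  apply List.ext_getElem
  · simp [pvRow_length m i hi]
  · intro j h1 h2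
    simp only [List.getElem_map, List.getElem_range]
    simp only [pvRow]
    rcases Nat.lt_trichotomy j (m - 1 - i) with h | h | h
    · rw [List.getElem_append_left (by simpa using h)]
      have : ¬((j : Int) + (i : Int) = (m : Int) - 1) := by omega
      simp [this]
    · rw [List.getElem_append_right (by simp [h])]
      have hj : (j : Int) + (i : Int) = (m : Int) - 1 := by omega
      simp [h]
      omega
    · rw [List.getElem_append_right (by simp; omega)]
      have hne : ¬((j : Int) + (i : Int) = (m : Int) - 1) := by omega
      obtain ⟨t, ht⟩ : ∃ t, j - (m - 1 - i) = t + 1 := ⟨j - (m - 1 - i) - 1, by omega⟩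
      simp [hne, ht]

-- a fold whose step ignores the element is an iteration over the length
theorem foldl_const_iterate {α β : Type} (f : β → β) (xs : List α) (init : β) :
    xs.foldl (fun st _ => f st) init = f^[xs.length] init := by
  induction xs generalizing init with
  | nil => simp
  | cons a t ih => simp [List.foldl_cons, ih, Function.iterate_succ_apply]

-- state of B's rotation loop after k iterations
theorem b_fold_inv (m : Nat) (hm : 0 < m) (k : Nat) (hk : k ≤ m) :
    (fun st : List (List Int) × List Int => (st.1 ++ [st.2], pvRot st.2))^[k]
        (([] : List (List Int)), pvRow m 0)
      = ((List.range k).map (pvRow m), pvRow m (k % m)) := by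
  induction k with
  | zero => simp
  | succ k ih =>
    rw [Function.iterate_succ_apply', ih (by omega)]
    have hkm : k % m = k := Nat.mod_eq_of_lt (by omega)
    simp only [List.range_succ, List.map_append, List.map_cons, List.map_nil]
    rw [pvRot_row m (k % m) (Nat.mod_lt _ hm), hkm]

theorem anti_diag_eq (n : Int) : anti_diag n = anti_diag_alt n := by
  rcases le_or_gt n 0 with hn | hn
  · unfold anti_diag anti_diag_alt
    have hr : PySem.List.pyRange 0 n 1 = [] := by
      rw [PySem.List.pyRange_one]
      have h : (n - 0).toNat = 0 := by omega
      rw [h]; simp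
    simp [hr, hn]
  · have hne : ¬ n ≤ 0 := by omega
    set m : Nat := n.toNat with hm
    have hmpos : 0 < m := by omega
    have hcast : (m : Int) = n := by omega
    have h0 : (n - 0).toNat = m := by omega
    -- A side
    have hA : anti_diag n = (List.range m).map (pvRow m) := by
      unfold anti_diag
      rw [foldl_append_singleton, PySem.List.pyRange_one, h0, List.map_map, List.nil_append]
      apply List.map_congr_left
      intro i hi
      rw [List.mem_range] at hi
      rw [Function.comp_apply, foldl_append_ite (fun y => y + (0 + (i : Int)) = n - 1)]
      rw [List.map_map, List.nil_append]
      have hfun : ((fun y => if y + (0 + (i : Int)) = n - 1 then (1 : Int) else 0)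
            ∘ fun k : Nat => (0 : Int) + k)
          = fun (y : Nat) => if (y : Int) + (i : Int) = (m : Int) - 1 then (1 : Int) else 0 := by
        funext y; simp [hcast]
      rw [hfun, a_row_eq m i hi]
    -- B side
    have hstep : (fun (st : List (List Int) × List Int) (_ : Int) =>
        (st.1 ++ [st.2],
         PySem.List.slice st.2 (some 1) none ++ PySem.List.slice st.2 none (some 1)))
        = fun st _ => (st.1 ++ [st.2], pvRot st.2) := by
      funext st x
      rw [PySem.List.slice_from_one,
        PySem.List.slice_to (xs := st.2) (b := 1) (by norm_num)]
      rfl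
    have hB : anti_diag_alt n = (List.range m).map (pvRow m) := by
      unfold anti_diag_alt
      rw [if_neg hne, hstep]
      have hrow0 : List.replicate (n - 1).toNat (0 : Int) ++ [1] = pvRow m 0 := by
        unfold pvRow
        have : (n - 1).toNat = m - 1 - 0 := by omega
        simp [this]
      rw [hrow0, foldl_const_iterate (fun st : List (List Int) × List Int =>
        (st.1 ++ [st.2], pvRot st.2))]
      have hlen : (PySem.List.pyRange 0 n 1).length = m := by
        rw [PySem.List.length_pyRange_one]; omega
      rw [hlen, b_fold_inv m hmpos m (le_refl m)]
    rw [hA, hB]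

-- ===== VERDICT (by name: the statement is the Claim_ definition above) =====
theorem anti_diag_spec : Claim_equal_anti_diag := by
  intro n _
  unfold Spec_anti_diag
  exact anti_diag_eq n
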